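-- pv_equiv track=rewrite | github.com/BeanBois/instant_policy_pp | experiments/exp1_aux.py | _rle_with_boundaries
-- ===== SOURCE A (Python) =====
-- from typing import List, Dict, Tuple, Optional
--
-- def _rle_with_boundaries(tokens: List[str], steps: List[int]) -> Tuple[List[str], List[int]]:
--     if not tokens:
--         return [], []
--     out_tok = [tokens[0]]
--     out_end = [steps[0]]
--     for t in range(1, len(tokens)):
--         if tokens[t] != out_tok[-1]:
--             out_tok.append(tokens[t])
--             out_end.append(steps[t])
--         else:
--             out_end[-1] = steps[t]
--     return out_tok, out_end
-- ===== SOURCE B (Python) =====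
-- from typing import List, Tuple
--
-- def _rle_with_boundaries(tokens: List[str], steps: List[int]) -> Tuple[List[str], List[int]]:
--     n = len(tokens)
--     if n == 0:
--         return [], []
--     # boundary detection: run starts (differ from predecessor) and run ends (differ from successor)
--     starts = [i for i in range(n) if i == 0 or tokens[i] != tokens[i - 1]]
--     ends = [i for i in range(n) if i == n - 1 or tokens[i + 1] != tokens[i]]
--     return [tokens[i] for i in starts], [steps[i] for i in ends]
-- ===== Notes on version B (the rewrite author's own statement) =====
-- stated objective: alternative
-- what changed: Replaces the compare-to-last-output accumulation loop (with in-place overwrite of the last end step) by a boundary-detection pass: run starts and run ends are computed as index filters and the two result lists are built directly from them.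
import Mathlib
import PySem

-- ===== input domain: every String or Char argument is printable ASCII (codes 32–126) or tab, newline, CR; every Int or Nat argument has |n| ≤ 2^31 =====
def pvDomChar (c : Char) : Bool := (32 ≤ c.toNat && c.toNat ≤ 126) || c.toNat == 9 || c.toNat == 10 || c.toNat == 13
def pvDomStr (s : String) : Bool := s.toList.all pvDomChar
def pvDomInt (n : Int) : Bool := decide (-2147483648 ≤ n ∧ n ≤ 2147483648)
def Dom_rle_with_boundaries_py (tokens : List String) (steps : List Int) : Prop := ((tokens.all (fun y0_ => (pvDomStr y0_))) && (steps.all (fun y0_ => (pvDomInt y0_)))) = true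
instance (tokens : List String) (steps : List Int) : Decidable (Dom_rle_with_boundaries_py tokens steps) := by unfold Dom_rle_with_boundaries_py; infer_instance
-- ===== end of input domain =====

-- B replaces A's compare-to-last-output accumulation loop by a boundary-detection pass
-- (filter the run-start and run-end indices, then index into tokens/steps); alternative decomposition, same cost.

-- ===== PORT A =====
def rle_with_boundaries_py (tokens : List String) (steps : List Int) : List String × List Int :=
  if tokens = [] then ([], [])
  else
    (PySem.List.pyRange 1 (PySem.List.len tokens) 1).foldl
      (fun st t =>
        if PySem.List.pyGetD tokens t "" ≠ PySem.List.pyGetD st.1 (-1) "" then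
          (st.1 ++ [PySem.List.pyGetD tokens t ""], st.2 ++ [PySem.List.pyGetD steps t 0])
        else
          (st.1, st.2.dropLast ++ [PySem.List.pyGetD steps t 0]))
      ([PySem.List.pyGetD tokens 0 ""], [PySem.List.pyGetD steps 0 0])

-- ===== PORT B =====
def rle_with_boundaries_py_alt (tokens : List String) (steps : List Int) : List String × List Int :=
  let n := PySem.List.len tokens
  if n = 0 then ([], [])
  else
    let starts := (PySem.List.pyRange 0 n 1).filter
      (fun i => (i == 0) || decide (PySem.List.pyGetD tokens i "" ≠ PySem.List.pyGetD tokens (i - 1) ""))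
    let ends := (PySem.List.pyRange 0 n 1).filter
      (fun i => (i == n - 1) || decide (PySem.List.pyGetD tokens (i + 1) "" ≠ PySem.List.pyGetD tokens i ""))
    (starts.map (fun i => PySem.List.pyGetD tokens i ""), ends.map (fun i => PySem.List.pyGetD steps i 0))

-- ===== PRECONDITION & SPEC =====
-- Pre_ excludes exactly the inputs where A raises IndexError: a nonempty tokens list with fewer steps than tokens.
def Pre_rle_with_boundaries_py (tokens : List String) (steps : List Int) : Prop :=
  tokens = [] ∨ tokens.length ≤ steps.length
instance (tokens : List String) (steps : List Int) : Decidable (Pre_rle_with_boundaries_py tokens steps) := by unfold Pre_rle_with_boundaries_py; infer_instance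

def pvWitness_rle_with_boundaries_py : List String × List Int := (["a", "a", "b"], [1, 2, 3])

def Spec_rle_with_boundaries_py (tokens : List String) (steps : List Int) (out : List String × List Int) : Prop := out = rle_with_boundaries_py_alt tokens steps
instance (tokens : List String) (steps : List Int) (out : List String × List Int) : Decidable (Spec_rle_with_boundaries_py tokens steps out) := by unfold Spec_rle_with_boundaries_py; infer_instance

-- ===== CLAIM (what is proved, stated in full; the proofs are below) =====
def Claim_equal_rle_with_boundaries_py : Prop := ∀ (tokens : List String) (steps : List Int), Dom_rle_with_boundaries_py tokens steps → Pre_rle_with_boundaries_py tokens steps → Spec_rle_with_boundaries_py tokens steps (rle_with_boundaries_py tokens steps)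

-- ===== LEMMAS AND PROOFS =====

-- Structural run-length helpers shared by both directions of the proof:
-- sP prev ts = the tokens of ts that start a new run (differ from their predecessor);
-- eP c s ps = the steps ending each run, where (c, s) is the current token and its latest step.
def sP (prev : String) : List String → List String
  | [] => []
  | t :: r => if t ≠ prev then t :: sP t r else sP t r

def eP (c : String) (s : Int) : List (String × Int) → List Int
  | [] => [s]
  | (t, e) :: r => if t ≠ c then s :: eP t e r else eP t e r

-- invariant of A's accumulation loop, phrased over the (token, step) pair list
theorem A_fold (ps : List (String × Int)) : ∀ (tk : List String) (ed : List Int) (c : String) (s : Int),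
    ps.foldl
      (fun (st : List String × List Int) (p : String × Int) =>
        if p.1 ≠ PySem.List.pyGetD st.1 (-1) "" then
          (st.1 ++ [p.1], st.2 ++ [p.2])
        else
          (st.1, st.2.dropLast ++ [p.2]))
      (tk ++ [c], ed ++ [s])
    = (tk ++ c :: sP c (ps.map Prod.fst), ed ++ eP c s ps) := by
  induction ps with
  | nil => intro tk ed c s; simp [sP, eP]
  | cons p r ih =>
    intro tk ed c s
    obtain ⟨t, e⟩ := p
    rw [List.foldl_cons]
    by_cases h : t = c
    · subst h
      rw [show (if (t ≠ PySem.List.pyGetD (tk ++ [t]) (-1) "") then ((tk ++ [t]) ++ [t], (ed ++ [s]) ++ [e]) else ((tk ++ [t]), (ed ++ [s]).dropLast ++ [e])) = ((tk ++ [t]), ed ++ [e]) by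
            rw [PySem.List.pyGetD_neg_one_append_singleton, List.dropLast_concat, if_neg (by simp)]]
      rw [ih tk ed t e]
      simp [sP, eP]
    · rw [show (if (t ≠ PySem.List.pyGetD (tk ++ [c]) (-1) "") then ((tk ++ [c]) ++ [t], (ed ++ [s]) ++ [e]) else ((tk ++ [c]), (ed ++ [s]).dropLast ++ [e])) = ((tk ++ [c]) ++ [t], (ed ++ [s]) ++ [e]) by
            rw [PySem.List.pyGetD_neg_one_append_singleton, if_pos (by simpa using h)]]
      rw [ih (tk ++ [c]) (ed ++ [s]) t e]
      simp [sP, eP, h]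

-- B's run-start filter over the index suffix [a, n) computes sP on the token suffix
theorem B_starts (tokens : List String) : ∀ (m a : Nat), 1 ≤ a → a + m = tokens.length →
    ((PySem.List.pyRange (a : Int) (tokens.length : Int)).filter
        (fun i => (i == 0) || decide (PySem.List.pyGetD tokens i "" ≠ PySem.List.pyGetD tokens (i - 1) ""))).map
        (fun i => PySem.List.pyGetD tokens i "")
    = sP (tokens.getD (a - 1) "") (tokens.drop a) := by
  intro m
  induction m with
  | zero =>
    intro a h1 h2
    rw [PySem.List.pyRange_one_eq_nil (by omega), List.drop_of_length_le (by omega)]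
    rfl
  | succ k ih =>
    intro a h1 h2
    have ha : a < tokens.length := by omega
    have hga : tokens.getD a "" = tokens[a] := by
      simp [List.getD_eq_getElem?_getD, List.getElem?_eq_getElem ha]
    have hget : PySem.List.pyGetD tokens (a : Int) "" = tokens[a] := by
      rw [PySem.List.pyGetD_natCast, hga]
    have hget1 : PySem.List.pyGetD tokens ((a : Int) - 1) "" = tokens.getD (a - 1) "" := by
      rw [show ((a : Int) - 1) = ((a - 1 : Nat) : Int) by omega, PySem.List.pyGetD_natCast]
    have hz : ((a : Int) == 0) = false := by simp; omega
    have hsucc : ((a : Int) + 1) = ((a + 1 : Nat) : Int) := by omega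
    rw [PySem.List.pyRange_one_cons (by exact_mod_cast ha), List.filter_cons, hz, hget, hget1,
        List.drop_eq_getElem_cons ha, Bool.false_or, hsucc]
    by_cases h : tokens[a] = tokens.getD (a - 1) ""
    · rw [if_neg (by simp only [decide_eq_true_eq]; exact fun hc => hc h), ih (a + 1) (by omega) (by omega)]
      simp only [Nat.add_sub_cancel, hga, sP, ne_eq, h, not_true_eq_false, if_false]
    · rw [if_pos (decide_eq_true h), List.map_cons, hget, ih (a + 1) (by omega) (by omega)]
      simp only [Nat.add_sub_cancel, hga, sP, ne_eq, h, not_false_eq_true, if_true]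

-- B's run-end filter over the index suffix [a, n-1), plus the always-kept last index, computes eP
theorem B_ends (tokens : List String) (steps : List Int) (hl : tokens.length ≤ steps.length) :
    ∀ (m a : Nat), a + 1 + m = tokens.length →
    ((PySem.List.pyRange (a : Int) ((tokens.length : Int) - 1)).filter
        (fun i => (i == (tokens.length : Int) - 1) || decide (PySem.List.pyGetD tokens (i + 1) "" ≠ PySem.List.pyGetD tokens i ""))).map
        (fun i => PySem.List.pyGetD steps i 0)
      ++ [PySem.List.pyGetD steps ((tokens.length : Int) - 1) 0]
    = eP (tokens.getD a "") (steps.getD a 0) ((tokens.zip steps).drop (a + 1)) := by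
  intro m
  induction m with
  | zero =>
    intro a h2
    have hza : ((tokens.length : Int) - 1) = ((a : Nat) : Int) := by omega
    rw [hza, PySem.List.pyRange_one_eq_nil (by omega), PySem.List.pyGetD_natCast,
        List.drop_of_length_le (by simp [List.length_zip]; omega)]
    rfl
  | succ k ih =>
    intro a h2
    have ha : a + 1 < tokens.length := by omega
    have hpl : a + 1 < (tokens.zip steps).length := by simp [List.length_zip]; omega
    have hga1 : PySem.List.pyGetD tokens ((a : Int) + 1) "" = tokens[a + 1] := by
      rw [show ((a : Int) + 1) = ((a + 1 : Nat) : Int) by omega, PySem.List.pyGetD_natCast]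
      simp [List.getD_eq_getElem?_getD, List.getElem?_eq_getElem ha]
    have hga : PySem.List.pyGetD tokens (a : Int) "" = tokens.getD a "" := PySem.List.pyGetD_natCast tokens a ""
    have hsa : PySem.List.pyGetD steps (a : Int) 0 = steps.getD a 0 := PySem.List.pyGetD_natCast steps a 0
    have hz : ((a : Int) == (tokens.length : Int) - 1) = false := by simp; omega
    have hsucc : ((a : Int) + 1) = ((a + 1 : Nat) : Int) := by omega
    have hzip : (tokens.zip steps)[a + 1]'hpl = (tokens[a + 1], steps[a + 1]'(by omega)) := List.getElem_zip
    have hgd1 : tokens.getD (a + 1) "" = tokens[a + 1] := by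
      simp [List.getD_eq_getElem?_getD, List.getElem?_eq_getElem ha]
    have hsd1 : steps.getD (a + 1) 0 = steps[a + 1]'(by omega) := by
      simp [List.getD_eq_getElem?_getD, List.getElem?_eq_getElem (show a + 1 < steps.length by omega)]
    rw [PySem.List.pyRange_one_cons (by omega), List.filter_cons, hz, hga1, hga,
        List.drop_eq_getElem_cons hpl, hzip, Bool.false_or]
    by_cases h : tokens[a + 1] = tokens.getD a ""
    · rw [if_neg (by simp only [decide_eq_true_eq]; exact fun hc => hc h), hsucc, ih (a + 1) (by omega)]
      simp only [eP, ne_eq, h, not_true_eq_false, if_false, hgd1, hsd1]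
    · rw [if_pos (decide_eq_true h), List.map_cons, List.cons_append, hsa, hsucc, ih (a + 1) (by omega)]
      simp only [eP, ne_eq, h, not_false_eq_true, if_true, hgd1, hsd1]

-- A on a nonempty input computes (first token :: run starts, run-end steps)
theorem A_closed (x : String) (xs : List String) (y : Int) (ys : List Int)
    (hl : xs.length ≤ ys.length) :
    rle_with_boundaries_py (x :: xs) (y :: ys)
      = (x :: sP x xs, eP x y (xs.zip ys)) := by
  have hplen : (((x :: xs).zip (y :: ys)).length : Int) = PySem.List.len (x :: xs) := by
    rw [PySem.List.len_eq, List.length_zip]; simp; omega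
  have hmem : ∀ (acc : List String × List Int), ∀ t ∈ PySem.List.pyRange 1 (PySem.List.len (x :: xs)) 1,
      (fun (st : List String × List Int) (t : Int) =>
        if PySem.List.pyGetD (x :: xs) t "" ≠ PySem.List.pyGetD st.1 (-1) "" then
          (st.1 ++ [PySem.List.pyGetD (x :: xs) t ""], st.2 ++ [PySem.List.pyGetD (y :: ys) t 0])
        else
          (st.1, st.2.dropLast ++ [PySem.List.pyGetD (y :: ys) t 0])) acc t
      = (fun (st : List String × List Int) (j : Int) =>
          (fun (st : List String × List Int) (p : String × Int) =>
            if p.1 ≠ PySem.List.pyGetD st.1 (-1) "" then (st.1 ++ [p.1], st.2 ++ [p.2])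
            else (st.1, st.2.dropLast ++ [p.2])) st
            (PySem.List.pyGetD ((x :: xs).zip (y :: ys)) j ("", 0))) acc t := by
    intro acc t ht
    rw [PySem.List.len_eq, PySem.List.mem_pyRange_one] at ht
    have h0 : (0 : Int) ≤ t := by omega
    have ht1 : t < (((x :: xs)).length : Int) := ht.2
    have htp : t < ((((x :: xs).zip (y :: ys))).length : Int) := by
      rw [show ((((x :: xs).zip (y :: ys))).length : Int) = (((x :: xs)).length : Int) by
        rw [List.length_zip]; simp; omega]
      exact ht1
    have hts : t < (((y :: ys)).length : Int) := by
      simp only [List.length_cons] at ht1 ⊢; omega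
    simp only []
    rw [PySem.List.pyGetD_eq_getElem ((x :: xs).zip (y :: ys)) ("", 0) h0 htp,
        PySem.List.pyGetD_eq_getElem (x :: xs) "" h0 ht1,
        PySem.List.pyGetD_eq_getElem (y :: ys) 0 h0 hts]
    rw [List.getElem_zip]
  calc rle_with_boundaries_py (x :: xs) (y :: ys)
      = (PySem.List.pyRange 1 (PySem.List.len (x :: xs)) 1).foldl
          (fun (st : List String × List Int) (t : Int) =>
            if PySem.List.pyGetD (x :: xs) t "" ≠ PySem.List.pyGetD st.1 (-1) "" then
              (st.1 ++ [PySem.List.pyGetD (x :: xs) t ""], st.2 ++ [PySem.List.pyGetD (y :: ys) t 0])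
            else
              (st.1, st.2.dropLast ++ [PySem.List.pyGetD (y :: ys) t 0]))
          ([x], [y]) := by
        rw [rle_with_boundaries_py, if_neg (by simp)]
        rw [PySem.List.pyGetD_zero_cons, PySem.List.pyGetD_zero_cons]
    _ = (PySem.List.pyRange 1 (PySem.List.len (x :: xs)) 1).foldl
          (fun (st : List String × List Int) (j : Int) =>
            (fun (st : List String × List Int) (p : String × Int) =>
              if p.1 ≠ PySem.List.pyGetD st.1 (-1) "" then (st.1 ++ [p.1], st.2 ++ [p.2])
              else (st.1, st.2.dropLast ++ [p.2])) st
              (PySem.List.pyGetD ((x :: xs).zip (y :: ys)) j ("", 0)))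
          ([x], [y]) := PySem.List.foldl_congr_mem _ _ _ _ hmem
    _ = (((x :: xs).zip (y :: ys)).drop ((1 : Int)).toNat).foldl
          (fun (st : List String × List Int) (p : String × Int) =>
            if p.1 ≠ PySem.List.pyGetD st.1 (-1) "" then (st.1 ++ [p.1], st.2 ++ [p.2])
            else (st.1, st.2.dropLast ++ [p.2]))
          ([x], [y]) := by
        rw [← hplen]
        exact PySem.List.foldl_pyRange_pyGetD' ((x :: xs).zip (y :: ys)) ("", 0)
          (fun (st : List String × List Int) (p : String × Int) =>
            if p.1 ≠ PySem.List.pyGetD st.1 (-1) "" then (st.1 ++ [p.1], st.2 ++ [p.2])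
            else (st.1, st.2.dropLast ++ [p.2]))
          ([x], [y]) (a := 1) (by norm_num)
    _ = (x :: sP x ((xs.zip ys).map Prod.fst), eP x y (xs.zip ys)) := by
        rw [List.zip_cons_cons, show Int.toNat 1 = 1 from rfl, List.drop_succ_cons, List.drop_zero]
        have := A_fold (xs.zip ys) [] [] x y
        simpa using this
    _ = (x :: sP x xs, eP x y (xs.zip ys)) := by
        rw [List.map_fst_zip (by omega)]

-- B on a nonempty input computes the same pair
theorem B_closed (x : String) (xs : List String) (y : Int) (ys : List Int)
    (hl : xs.length ≤ ys.length) :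
    rle_with_boundaries_py_alt (x :: xs) (y :: ys)
      = (x :: sP x xs, eP x y (xs.zip ys)) := by
  have hlen : 1 ≤ (x :: xs).length := by simp
  have hfst :
      ((PySem.List.pyRange 0 (((x :: xs).length : Nat) : Int) 1).filter
          (fun i => (i == 0) || decide (PySem.List.pyGetD (x :: xs) i "" ≠ PySem.List.pyGetD (x :: xs) (i - 1) ""))).map
          (fun i => PySem.List.pyGetD (x :: xs) i "")
      = x :: sP x xs := by
    rw [PySem.List.pyRange_one_cons (by simp), List.filter_cons]
    have hc : (((0 : Int) == 0) || decide (PySem.List.pyGetD (x :: xs) 0 "" ≠ PySem.List.pyGetD (x :: xs) (0 - 1) "")) = true := by simp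
    rw [hc, if_pos rfl, List.map_cons, PySem.List.pyGetD_zero_cons,
        show ((0 : Int) + 1) = ((1 : Nat) : Int) by norm_num]
    have hBS := B_starts (x :: xs) xs.length 1 (le_refl 1) (by simp [Nat.add_comm])
    simp only [Nat.sub_self, List.getD_cons_zero, List.drop_one, List.tail_cons] at hBS
    rw [hBS]
  have hsnd :
      ((PySem.List.pyRange 0 (((x :: xs).length : Nat) : Int) 1).filter
          (fun i => (i == ((x :: xs).length : Int) - 1) || decide (PySem.List.pyGetD (x :: xs) (i + 1) "" ≠ PySem.List.pyGetD (x :: xs) i ""))).map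
          (fun i => PySem.List.pyGetD (y :: ys) i 0)
      = eP x y (xs.zip ys) := by
    set p : Int → Bool := (fun i => (i == ((x :: xs).length : Int) - 1) || decide (PySem.List.pyGetD (x :: xs) (i + 1) "" ≠ PySem.List.pyGetD (x :: xs) i "")) with hp
    rw [show (((x :: xs).length : Nat) : Int) = (((x :: xs).length : Int) - 1) + 1 by ring,
        PySem.List.pyRange_one_succ_right (by simp), List.filter_append, List.map_append,
        List.filter_cons, List.filter_nil]
    have hpc : p (((x :: xs).length : Int) - 1) = true := by rw [hp]; simp
    rw [if_pos hpc, List.map_cons, List.map_nil]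
    have hBE := B_ends (x :: xs) (y :: ys) (by simp; omega) xs.length 0 (by simp [Nat.add_comm])
    rw [← hp] at hBE
    simp only [Nat.cast_zero, List.getD_cons_zero, Nat.zero_add, List.drop_one, List.tail_cons,
        List.zip_cons_cons] at hBE
    rw [hBE]
  have hn : PySem.List.len (x :: xs) = (((x :: xs).length : Nat) : Int) := PySem.List.len_eq _
  simp only [rle_with_boundaries_py_alt, hn]
  rw [if_neg (by simp; omega)]
  rw [hfst, hsnd]

-- ===== VERDICT (by name: the statement is the Claim_ definition above) =====
theorem rle_with_boundaries_py_spec : Claim_equal_rle_with_boundaries_py := by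
  intro tokens steps _ hpre
  unfold Spec_rle_with_boundaries_py
  cases tokens with
  | nil => rfl
  | cons x xs =>
    have hl : xs.length + 1 ≤ steps.length := by
      rcases hpre with h | h
      · exact absurd h (by simp)
      · simpa using h
    cases steps with
    | nil => simp at hl
    | cons y ys =>
      rw [A_closed x xs y ys (by simpa using hl), B_closed x xs y ys (by simpa using hl)]
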